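-- pv_equiv track=rewrite | github.com/strangeloopcanon/Horace | tools/finalize.py | pick_latest_by_preset
-- ===== SOURCE A (Python) =====
-- from typing import Dict, List, Optional
--
-- def pick_latest_by_preset(entries: List[Dict], presets: List[str], max_per: int = 3) -> Dict[str, List[Dict]]:
--     buckets: Dict[str, List[Dict]] = {p: [] for p in presets}
--     for e in entries:
--         p = e.get('preset')
--         if p in buckets:
--             buckets[p].append(e)
--     # keep latest max_per per preset
--     for p in list(buckets.keys()):
--         buckets[p] = buckets[p][-max_per:]
--     return buckets
-- ===== SOURCE B (Python) =====
-- def pick_latest_by_preset(entries, presets, max_per=3):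
--     # one dict comprehension: each preset scans entries itself, then takes the last max_per
--     return {p: [e for e in entries if e.get('preset') == p][-max_per:] for p in presets}
-- ===== Notes on version B (the rewrite author's own statement) =====
-- stated objective: idiomatic
-- what changed: Replaced the three-phase mutable bucketing (pre-seeded dict, dispatch pass appending into buckets, then a rewrite pass slicing each bucket) by a single dict comprehension in which each preset filters the entries itself and slices once.
import Mathlib
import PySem

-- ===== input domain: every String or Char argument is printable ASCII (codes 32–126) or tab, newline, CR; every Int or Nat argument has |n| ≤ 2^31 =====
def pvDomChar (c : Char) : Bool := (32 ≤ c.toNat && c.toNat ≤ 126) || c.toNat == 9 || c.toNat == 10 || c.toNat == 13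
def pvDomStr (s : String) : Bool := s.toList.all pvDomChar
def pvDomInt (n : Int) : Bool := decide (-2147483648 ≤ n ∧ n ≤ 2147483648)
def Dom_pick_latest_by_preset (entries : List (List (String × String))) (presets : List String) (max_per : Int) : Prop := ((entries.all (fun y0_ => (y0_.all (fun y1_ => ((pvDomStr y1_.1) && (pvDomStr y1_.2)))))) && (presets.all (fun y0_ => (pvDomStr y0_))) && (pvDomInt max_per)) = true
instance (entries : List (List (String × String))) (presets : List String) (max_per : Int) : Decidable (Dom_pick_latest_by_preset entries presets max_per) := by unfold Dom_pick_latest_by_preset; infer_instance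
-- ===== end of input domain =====

-- B replaces A's three-phase mutable bucketing by a single dict comprehension where each
-- preset filters the entries itself; equivalence of the returned dicts is proved (no mutation observable).

-- ===== PORT A =====
-- A builds a pre-seeded bucket dict, dispatches each entry into its bucket, then rewrites each bucket with [-max_per:].
def pick_latest_by_preset (entries : List (List (String × String))) (presets : List String) (max_per : Int) : List (String × List (List (String × String))) :=
  let b0 : PySem.Dict String (List (List (String × String))) :=
    presets.foldl (fun d p => d.insert p []) PySem.Dict.empty
  let b1 := entries.foldl (fun d e =>
      match List.lookup "preset" e with
      | some p => if d.contains p then d.modify p [] (fun xs => xs ++ [e]) else d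
      | none => d) b0
  let b2 := (b1.keys).foldl (fun d p => d.modify p [] (fun xs => PySem.List.slice xs (some (-max_per)) none)) b1
  b2.items

-- ===== PORT B =====
-- dict comprehension: {p: [e for e in entries if e.get('preset') == p][-max_per:] for p in presets}
def pick_latest_by_preset_alt (entries : List (List (String × String))) (presets : List String) (max_per : Int) : List (String × List (List (String × String))) :=
  (presets.foldl (fun d p =>
      d.insert p (PySem.List.slice (entries.filter (fun e => List.lookup "preset" e == some p)) (some (-max_per)) none))
    (PySem.Dict.empty : PySem.Dict String (List (List (String × String))))).items

-- ===== PRECONDITION & SPEC =====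
def Spec_pick_latest_by_preset (entries : List (List (String × String))) (presets : List String) (max_per : Int) (out : List (String × List (List (String × String)))) : Prop := out = pick_latest_by_preset_alt entries presets max_per
instance (entries : List (List (String × String))) (presets : List String) (max_per : Int) (out : List (String × List (List (String × String)))) : Decidable (Spec_pick_latest_by_preset entries presets max_per out) := by unfold Spec_pick_latest_by_preset; infer_instance

-- ===== CLAIM (what is proved, stated in full; the proofs are below) =====
def Claim_equal_pick_latest_by_preset : Prop := ∀ (entries : List (List (String × String))) (presets : List String) (max_per : Int), Dom_pick_latest_by_preset entries presets max_per → Spec_pick_latest_by_preset entries presets max_per (pick_latest_by_preset entries presets max_per)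

-- ===== LEMMAS AND PROOFS =====

-- getD through a fold of inserts whose value depends only on the key
lemma getD_foldl_insert_key {V : Type} (f : String → V) (dflt : V) (l : List String) (d : PySem.Dict String V) (p : String) :
    (l.foldl (fun d q => d.insert q (f q)) d).getD p dflt
      = if p ∈ l then f p else d.getD p dflt := by
  induction l generalizing d with
  | nil => simp
  | cons x t ih =>
    simp only [List.foldl_cons, ih, PySem.Dict.getD_insert, List.mem_cons]
    by_cases hpt : p ∈ t <;> by_cases hpx : p = x <;> simp [hpt, hpx]

lemma getD_phase0 (l : List String) (d : PySem.Dict String (List (List (String × String)))) (p : String)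
    (h : d.getD p [] = []) :
    (l.foldl (fun d q => d.insert q ([] : List (List (String × String)))) d).getD p [] = [] := by
  rw [getD_foldl_insert_key (fun _ => []) [] l d p]; split <;> simp [h]

-- phase-2 step keeps contains
lemma contains_phase2_step (d : PySem.Dict String (List (List (String × String)))) (e : List (String × String)) (p : String)
    (h : d.contains p = true) :
    ((match List.lookup "preset" e with
      | some q => if d.contains q then d.modify q [] (fun xs => xs ++ [e]) else d
      | none => d).contains p) = true := by
  rcases hq : List.lookup "preset" e with _ | q <;> simp only []
  · exact h
  · by_cases hc : d.contains q = true <;> simp [hc, PySem.Dict.contains_modify, h]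

lemma getD_phase2 (l : List (List (String × String))) (d : PySem.Dict String (List (List (String × String)))) (p : String)
    (hp : d.contains p = true) :
    (l.foldl (fun d e =>
        match List.lookup "preset" e with
        | some q => if d.contains q then d.modify q [] (fun xs => xs ++ [e]) else d
        | none => d) d).getD p []
      = d.getD p [] ++ l.filter (fun e => List.lookup "preset" e == some p) := by
  induction l generalizing d with
  | nil => simp
  | cons e t ih =>
    simp only [List.foldl_cons, List.filter_cons]
    have hstep := ih _ (contains_phase2_step d e p hp)
    rw [hstep]
    rcases hq : List.lookup "preset" e with _ | q
    · simp
    · by_cases hqp : q = p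
      · subst hqp
        simp [hp, PySem.Dict.getD_modify_self]
      · by_cases hc : d.contains q = true <;>
          simp [hc, PySem.Dict.getD_modify, hqp, Ne.symm hqp, beq_iff_eq]

-- phase 3: getD untouched when p not in the key list
lemma getD_phase3_notmem (g : List (List (String × String)) → List (List (String × String)))
    (ks : List String) (d : PySem.Dict String (List (List (String × String)))) (p : String) (hp : p ∉ ks) :
    (ks.foldl (fun d q => d.modify q [] g) d).getD p [] = d.getD p [] := by
  induction ks generalizing d with
  | nil => rfl
  | cons k t ih =>
    simp only [List.mem_cons, not_or] at hp
    rw [List.foldl_cons, ih _ hp.2, PySem.Dict.getD_modify, if_neg hp.1]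

lemma getD_phase3 (g : List (List (String × String)) → List (List (String × String)))
    (ks : List String) (d : PySem.Dict String (List (List (String × String)))) (p : String)
    (hnd : ks.Nodup) (hp : p ∈ ks) :
    (ks.foldl (fun d q => d.modify q [] g) d).getD p [] = g (d.getD p []) := by
  induction ks generalizing d with
  | nil => cases hp
  | cons k t ih =>
    simp only [List.foldl_cons]
    rcases List.mem_cons.mp hp with h | h
    · subst h
      rw [getD_phase3_notmem g t _ p (List.nodup_cons.mp hnd).1, PySem.Dict.getD_modify_self]
    · rw [ih _ ((List.nodup_cons.mp hnd).2) h, PySem.Dict.getD_modify]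
      have : p ≠ k := fun hh => (List.nodup_cons.mp hnd).1 (hh ▸ h)
      simp [this]

-- phase-2 steps / fold keep the key list unchanged
lemma keys_phase2_step (d : PySem.Dict String (List (List (String × String)))) (e : List (String × String)) :
    ((match List.lookup "preset" e with
      | some q => if d.contains q then d.modify q [] (fun xs => xs ++ [e]) else d
      | none => d) : PySem.Dict String (List (List (String × String)))).keys = d.keys := by
  rcases hq : List.lookup "preset" e with _ | q
  · rfl
  · by_cases hc : d.contains q = true
    · simp only [hc, if_true, PySem.Dict.keys_modify, PySem.Dict.keys_insert_of_contains _ _ hc]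
    · simp [hc]

lemma keys_phase2_fold (l : List (List (String × String))) (d : PySem.Dict String (List (List (String × String)))) :
    (l.foldl (fun d e =>
        match List.lookup "preset" e with
        | some q => if d.contains q then d.modify q [] (fun xs => xs ++ [e]) else d
        | none => d) d).keys = d.keys := by
  induction l generalizing d with
  | nil => rfl
  | cons e t ih => rw [List.foldl_cons, ih, keys_phase2_step]

-- phase-3 fold over keys that are all present keeps the key list unchanged
lemma keys_phase3 (g : List (List (String × String)) → List (List (String × String)))
    (ks : List String) (d : PySem.Dict String (List (List (String × String))))
    (h : ∀ q ∈ ks, d.contains q = true) :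
    (ks.foldl (fun d q => d.modify q [] g) d).keys = d.keys := by
  induction ks generalizing d with
  | nil => rfl
  | cons k t ih =>
    have hk : d.contains k = true := h k (List.mem_cons_self ..)
    have hkeys : (d.modify k [] g).keys = d.keys := by
      rw [PySem.Dict.keys_modify, PySem.Dict.keys_insert_of_contains _ _ hk]
    rw [List.foldl_cons, ih _ (fun q hq => by
      rw [PySem.Dict.contains_modify]
      simp [h q (List.mem_cons_of_mem _ hq)]), hkeys]

-- ===== VERDICT (by name: the statement is the Claim_ definition above) =====
theorem pick_latest_by_preset_spec : Claim_equal_pick_latest_by_preset := by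
  intro entries presets max_per _
  unfold Spec_pick_latest_by_preset pick_latest_by_preset pick_latest_by_preset_alt
  -- names for the three phases of A and for B's dict
  set dA0 : PySem.Dict String (List (List (String × String))) :=
    presets.foldl (fun d p => d.insert p []) PySem.Dict.empty with hdA0
  set dA1 : PySem.Dict String (List (List (String × String))) :=
    entries.foldl (fun d e =>
      match List.lookup "preset" e with
      | some p => if d.contains p then d.modify p [] (fun xs => xs ++ [e]) else d
      | none => d) dA0 with hdA1
  set dA2 : PySem.Dict String (List (List (String × String))) :=
    (dA1.keys).foldl (fun d p => d.modify p [] (fun xs => PySem.List.slice xs (some (-max_per)) none)) dA1 with hdA2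
  set dB : PySem.Dict String (List (List (String × String))) :=
    presets.foldl (fun d p =>
      d.insert p (PySem.List.slice (entries.filter (fun e => List.lookup "preset" e == some p)) (some (-max_per)) none))
      PySem.Dict.empty with hdB
  have hkA0 : dA0.keys = PySem.Set.ofList presets := by
    rw [hdA0]
    have := PySem.Dict.keys_foldl_insert (ν := List (List (String × String))) presets
      (fun _ _ => []) PySem.Dict.empty
    simpa [PySem.Set.update_nil_left] using this
  have hndA0 : dA0.keys.Nodup := by
    rw [hdA0]
    exact PySem.Dict.nodup_keys_foldl_insert presets (fun _ _ => []) _ PySem.Dict.nodup_keys_empty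
  have hkA1 : dA1.keys = dA0.keys := by rw [hdA1]; exact keys_phase2_fold entries dA0
  have hcA1 : ∀ q ∈ dA1.keys, dA1.contains q = true := fun q hq =>
    (PySem.Dict.contains_iff_mem_keys ..).mpr hq
  have hkA2 : dA2.keys = dA1.keys := by
    rw [hdA2]; exact keys_phase3 _ dA1.keys dA1 hcA1
  have hgA1 : ∀ p ∈ dA0.keys, dA1.getD p [] = entries.filter (fun e => List.lookup "preset" e == some p) := by
    intro p hp
    have hc0 : dA0.contains p = true := (PySem.Dict.contains_iff_mem_keys ..).mpr hp
    have h0 : dA0.getD p [] = [] := by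
      rw [hdA0]; exact getD_phase0 presets PySem.Dict.empty p (by simp)
    rw [hdA1, getD_phase2 entries dA0 p hc0, h0, List.nil_append]
  have hgA2 : ∀ p ∈ dA1.keys, dA2.getD p []
      = PySem.List.slice (entries.filter (fun e => List.lookup "preset" e == some p)) (some (-max_per)) none := by
    intro p hp
    rw [hdA2, getD_phase3 _ dA1.keys dA1 p (hkA1 ▸ hndA0) hp, hgA1 p (hkA1 ▸ hp)]
  have hkB : dB.keys = PySem.Set.ofList presets := by
    rw [hdB]
    have := PySem.Dict.keys_foldl_insert (ν := List (List (String × String))) presets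
      (fun _ p => PySem.List.slice (entries.filter (fun e => List.lookup "preset" e == some p)) (some (-max_per)) none)
      PySem.Dict.empty
    simpa [PySem.Set.update_nil_left] using this
  have hndB : dB.keys.Nodup := by
    rw [hdB]
    exact PySem.Dict.nodup_keys_foldl_insert presets _ _ PySem.Dict.nodup_keys_empty
  have hgB : ∀ p ∈ presets, dB.getD p []
      = PySem.List.slice (entries.filter (fun e => List.lookup "preset" e == some p)) (some (-max_per)) none := by
    intro p hp
    rw [hdB, getD_foldl_insert_key
      (fun p => PySem.List.slice (entries.filter (fun e => List.lookup "preset" e == some p)) (some (-max_per)) none)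
      [] presets PySem.Dict.empty p, if_pos hp]
  rw [PySem.Dict.items_eq_map_keys dA2 (by rw [hkA2, hkA1]; exact hndA0) [],
      PySem.Dict.items_eq_map_keys dB hndB [], hkA2, hkB, hkA1, hkA0]
  refine List.map_congr_left ?_
  intro p hp
  have hpp : p ∈ presets := (PySem.Set.mem_ofList ..).mp hp
  rw [hgA2 p (hkA1 ▸ hkA0 ▸ hp), hgB p hpp]
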